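-- pv_equiv track=rewrite | github.com/Shesky17/pyrhyme | rhymes/RhymingDictionary.py | is_rhyme_sound
-- ===== SOURCE A (Python) =====
-- def is_rhyme_sound(sound_list1, sound_list2):
--     bool_is_rhyme = False
--     for (sound1, sound2) in zip(reversed(sound_list1), reversed(sound_list2)):
--         if ''.join(i for i in sound1 if not i.isdigit()) == ''.join(i for i in sound2 if not i.isdigit()):
--             if len(sound1) == 3:
--                 bool_is_rhyme = True
--         else:
--             break
--     return bool_is_rhyme
-- ===== SOURCE B (Python) =====
-- def is_rhyme_sound(sound_list1, sound_list2):
--     def strip_digits(s):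
--         return ''.join(c for c in s if not c.isdigit())
--     r1 = [strip_digits(s) for s in reversed(sound_list1)]
--     r2 = [strip_digits(s) for s in reversed(sound_list2)]
--     n = min(len(r1), len(r2))
--     m = next((i for i in range(n) if r1[i] != r2[i]), n)
--     return any(len(s) == 3 for s in sound_list1[len(sound_list1) - m:])
-- ===== Notes on version B (the rewrite author's own statement) =====
-- stated objective: simpler
-- what changed: Replaces the interleaved flag-setting break-loop by a decomposition: pre-strip digits from both reversed lists, locate the first mismatch index m, then a separate any() over the last m original elements of the first list.
import Mathlib
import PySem

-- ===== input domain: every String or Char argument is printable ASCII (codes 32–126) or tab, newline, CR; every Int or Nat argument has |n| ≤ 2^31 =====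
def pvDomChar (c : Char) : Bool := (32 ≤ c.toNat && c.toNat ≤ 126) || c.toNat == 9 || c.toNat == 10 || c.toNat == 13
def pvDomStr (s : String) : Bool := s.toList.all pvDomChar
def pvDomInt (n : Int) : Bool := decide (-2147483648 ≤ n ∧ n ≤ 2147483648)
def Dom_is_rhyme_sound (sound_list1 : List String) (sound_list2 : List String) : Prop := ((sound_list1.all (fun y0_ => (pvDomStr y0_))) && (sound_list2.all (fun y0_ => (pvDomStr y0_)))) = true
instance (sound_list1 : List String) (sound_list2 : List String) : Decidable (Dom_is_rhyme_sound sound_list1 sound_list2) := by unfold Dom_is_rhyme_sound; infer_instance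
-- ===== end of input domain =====

-- B replaces A's interleaved flag-setting break-loop by a plain decomposition
-- (strip both reversed lists, find the first mismatch index, then any() over the
-- matched suffix of the first list); objective: simpler.

-- ===== PORT A =====
-- ''.join(i for i in sound if not i.isdigit()); PySem.Chars.isdigit is exact on the ASCII domain
def stripDigitsA (s : String) : String := String.mk (s.toList.filter (fun c => !(PySem.Chars.isdigit c)))

-- the for-loop over zip(reversed, reversed) with the bool flag and the break
def rhymeLoopA : List (String × String) → Bool → Bool
  | [], b => b
  | (s1, s2) :: rest, b =>
    if stripDigitsA s1 = stripDigitsA s2 then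
      rhymeLoopA rest (if PySem.Str.len s1 = 3 then true else b)
    else b

def is_rhyme_sound (sound_list1 : List String) (sound_list2 : List String) : Bool :=
  rhymeLoopA (sound_list1.reverse.zip sound_list2.reverse) false

-- ===== PORT B =====
def stripDigitsB (s : String) : String := String.mk (s.toList.filter (fun c => !(PySem.Chars.isdigit c)))

-- m = next((i for i in range(n) if r1[i] != r2[i]), n): first index where the
-- stripped reversed lists differ, capped at the shorter length
def mismatchIdx : List String → List String → Nat
  | x :: xs, y :: ys => if x = y then mismatchIdx xs ys + 1 else 0
  | _, _ => 0

def is_rhyme_sound_alt (sound_list1 : List String) (sound_list2 : List String) : Bool :=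
  let r1 := sound_list1.reverse.map stripDigitsB
  let r2 := sound_list2.reverse.map stripDigitsB
  let m := mismatchIdx r1 r2
  -- sound_list1[len(sound_list1)-m:] with 0 ≤ len-m ≤ len is exactly List.drop
  (sound_list1.drop (sound_list1.length - m)).any (fun s => PySem.Str.len s == 3)

-- ===== PRECONDITION & SPEC =====
def Spec_is_rhyme_sound (sound_list1 : List String) (sound_list2 : List String) (out : Bool) : Prop := out = is_rhyme_sound_alt sound_list1 sound_list2
instance (sound_list1 : List String) (sound_list2 : List String) (out : Bool) : Decidable (Spec_is_rhyme_sound sound_list1 sound_list2 out) := by unfold Spec_is_rhyme_sound; infer_instance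

-- ===== CLAIM (what is proved, stated in full; the proofs are below) =====
def Claim_equal_is_rhyme_sound : Prop := ∀ (sound_list1 : List String) (sound_list2 : List String), Dom_is_rhyme_sound sound_list1 sound_list2 → Spec_is_rhyme_sound sound_list1 sound_list2 (is_rhyme_sound sound_list1 sound_list2)

-- ===== LEMMAS AND PROOFS =====
theorem rhymeLoopA_eq (xs ys : List String) (b : Bool) :
    rhymeLoopA (xs.zip ys) b =
      (b || (xs.take (mismatchIdx (xs.map stripDigitsB) (ys.map stripDigitsB))).any
              (fun s => PySem.Str.len s == 3)) := by
  induction xs generalizing ys b with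
  | nil => simp [rhymeLoopA]
  | cons x xs ih =>
    cases ys with
    | nil => simp [rhymeLoopA, mismatchIdx]
    | cons y ys =>
      simp only [List.zip_cons_cons, rhymeLoopA, List.map_cons, mismatchIdx, stripDigitsB,
        stripDigitsA]
      split
      · rw [ih]
        simp only [List.take_succ_cons, List.any_cons]
        have hd : ∀ n : Int, (n == 3) = decide (n = 3) := by
          intro n
          by_cases h3 : n = 3
          · simp [h3]
          · simp [h3, beq_eq_false_iff_ne]
        cases b <;> by_cases h3 : PySem.Str.len x = 3
        · simp only [hd]; simp [h3]
        · simp only [hd]; simp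
        · simp only [hd]; simp
        · simp only [hd]; simp
      · simp

theorem is_rhyme_sound_spec : Claim_equal_is_rhyme_sound := by
  intro l1 l2 _
  show is_rhyme_sound l1 l2 = is_rhyme_sound_alt l1 l2
  unfold is_rhyme_sound is_rhyme_sound_alt
  rw [rhymeLoopA_eq]
  rw [Bool.false_or]
  rw [List.take_reverse]
  rw [List.any_reverse]
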